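-- pv_equiv track=rewrite | github.com/daniel-reich/ubiquitous-fiesta | qeyinsjZHCPEddbfe_18.py | dice_game
-- ===== SOURCE A (Python) =====
-- def dice_game(lst):
--     s=0
--     for i in lst:
--         if i[0]!=i[1]:
--
--             s+=i[0]+i[1]
--         else:
--             return 0
--     return s
-- ===== SOURCE B (Python) =====
-- def dice_game(lst):
--     if any(i[0] == i[1] for i in lst):
--         return 0
--     return sum(i[0] + i[1] for i in lst)
-- ===== Notes on version B (the rewrite author's own statement) =====
-- stated objective: idiomatic
-- what changed: Replaced the fused single loop with early return by a separate any() doubles check followed by a sum() over the whole list.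
import Mathlib
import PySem

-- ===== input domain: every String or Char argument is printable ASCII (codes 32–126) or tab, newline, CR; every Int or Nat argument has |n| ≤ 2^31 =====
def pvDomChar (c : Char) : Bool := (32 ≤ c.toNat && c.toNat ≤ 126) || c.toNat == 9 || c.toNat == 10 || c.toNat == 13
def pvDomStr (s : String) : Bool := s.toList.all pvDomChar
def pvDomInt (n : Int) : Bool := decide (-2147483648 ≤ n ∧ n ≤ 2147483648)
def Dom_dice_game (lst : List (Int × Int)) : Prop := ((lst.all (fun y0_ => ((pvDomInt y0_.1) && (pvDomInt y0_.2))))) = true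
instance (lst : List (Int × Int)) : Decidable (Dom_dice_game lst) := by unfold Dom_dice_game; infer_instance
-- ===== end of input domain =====

-- B replaces A's fused loop with early return by an any-doubles check followed by a whole-list sum (idiomatic).


-- ===== PORT A =====
-- loop with early return, accumulator s
def dice_game_loop (s : Int) : List (Int × Int) → Int
  | [] => s
  | i :: rest => if i.1 ≠ i.2 then dice_game_loop (s + (i.1 + i.2)) rest else 0

def dice_game (lst : List (Int × Int)) : Int := dice_game_loop 0 lst

-- ===== PORT B =====
def dice_game_alt (lst : List (Int × Int)) : Int :=
  if lst.any (fun i => i.1 == i.2) then 0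
  else (lst.map (fun i => i.1 + i.2)).sum

-- ===== PRECONDITION & SPEC =====
def Spec_dice_game (lst : List (Int × Int)) (out : Int) : Prop := out = dice_game_alt lst
instance (lst : List (Int × Int)) (out : Int) : Decidable (Spec_dice_game lst out) := by unfold Spec_dice_game; infer_instance

-- ===== CLAIM (what is proved, stated in full; the proofs are below) =====
def Claim_equal_dice_game : Prop := ∀ (lst : List (Int × Int)), Dom_dice_game lst → Spec_dice_game lst (dice_game lst)

-- ===== LEMMAS AND PROOFS =====
theorem dice_game_loop_eq (lst : List (Int × Int)) (s : Int) :
    dice_game_loop s lst =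
      if lst.any (fun i => i.1 == i.2) then 0
      else s + (lst.map (fun i => i.1 + i.2)).sum := by
  induction lst generalizing s with
  | nil => simp [dice_game_loop]
  | cons i rest ih =>
    simp only [dice_game_loop, List.any_cons, List.map_cons, List.sum_cons]
    by_cases h : i.1 = i.2
    · simp [h]
    · have hb : (i.1 == i.2) = false := by simp [h]
      rw [if_pos h, ih, hb]
      simp only [Bool.false_or]
      split_ifs with hr
      · rfl
      · ring

-- ===== VERDICT (by name: the statement is the Claim_ definition above) =====
theorem dice_game_spec : Claim_equal_dice_game := by
  intro lst _
  unfold Spec_dice_game dice_game dice_game_alt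
  rw [dice_game_loop_eq]
  simp
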